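-- pv_equiv track=rewrite | github.com/mosif16/RLM-Mem_MCP | python/src/rlm_mem_mcp/server.py | _perform_literal_search
-- ===== SOURCE A (Python) =====
-- def _perform_literal_search(content: str, search_terms: list[str]) -> str:
--     """
--     Perform grep-like literal search on content.
--
--     This is the fast-path that bypasses LLM routing entirely.
--
--     Args:
--         content: The combined file content (with ### File: headers)
--         search_terms: List of literal strings to search for
--
--     Returns:
--         Formatted search results
--     """
--     results = []
--     current_file = "unknown"
--     line_number = 0
--
--     # Track findings per search term
--     findings: dict[str, list[dict]] = {term: [] for term in search_terms}
--
--     for line in content.split('\n'):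
--         line_number += 1
--
--         # Track current file from headers
--         if line.startswith("### File:"):
--             current_file = line.replace("### File:", "").strip()
--             line_number = 0  # Reset for new file
--             continue
--
--         # Check each search term (case-insensitive)
--         line_lower = line.lower()
--         for term in search_terms:
--             if term.lower() in line_lower:
--                 findings[term].append({
--                     "file": current_file,
--                     "line": line_number,
--                     "content": line.strip()[:200]  # Truncate long lines
--                 })
--
--     # Format results
--     output_parts = ["## Literal Search Results\n"]
--     total_matches = 0
--
--     for term, matches in findings.items():
--         total_matches += len(matches)
--         output_parts.append(f"\n### \"{term}\" ({len(matches)} matches)\n")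
--
--         if not matches:
--             output_parts.append("No matches found.\n")
--         else:
--             # Group by file
--             by_file: dict[str, list[dict]] = {}
--             for match in matches:
--                 file = match["file"]
--                 if file not in by_file:
--                     by_file[file] = []
--                 by_file[file].append(match)
--
--             for file, file_matches in by_file.items():
--                 output_parts.append(f"\n**{file}**\n")
--                 for m in file_matches[:10]:  # Limit per file
--                     output_parts.append(f"  Line {m['line']}: `{m['content']}`\n")
--                 if len(file_matches) > 10:
--                     output_parts.append(f"  ... and {len(file_matches) - 10} more matches\n")
--
--     output_parts.append(f"\n---\n*Total: {total_matches} matches across {len(search_terms)} search term(s)*\n")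
--     output_parts.append("*Tip: Use native Grep tool for better performance on literal searches.*\n")
--
--     return "".join(output_parts)
-- ===== SOURCE B (Python) =====
-- def _perform_literal_search(content: str, search_terms: list[str]) -> str:
--     """Two-pass grep: first parse content into per-file blocks of numbered lines,
--     then search term-by-term over the blocks (term-outer loop)."""
--     # Pass 1: split content into blocks of (file_name, [(line_no, line), ...]).
--     blocks = []
--     name, lines, n = "unknown", [], 0
--     for line in content.split('\n'):
--         if line.startswith("### File:"):
--             blocks.append((name, lines))
--             name = line.replace("### File:", "").strip()
--             lines, n = [], 0
--         else:
--             n += 1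
--             lines.append((n, line))
--     blocks.append((name, lines))
--
--     # Pass 2: for each term, collect its matches per file from the blocks.
--     parts = ["## Literal Search Results\n"]
--     total = 0
--     for term in search_terms:
--         tl = term.lower()
--         by_file = {}
--         for fname, flines in blocks:
--             hits = [(k, l.strip()[:200]) for k, l in flines if tl in l.lower()]
--             if hits:
--                 by_file.setdefault(fname, []).extend(hits)
--         count = sum(len(v) for v in by_file.values())
--         total += count
--         parts.append(f"\n### \"{term}\" ({count} matches)\n")
--         if not by_file:
--             parts.append("No matches found.\n")
--         else:
--             for fname, hits in by_file.items():
--                 parts.append(f"\n**{fname}**\n")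
--                 for k, text in hits[:10]:
--                     parts.append(f"  Line {k}: `{text}`\n")
--                 if len(hits) > 10:
--                     parts.append(f"  ... and {len(hits) - 10} more matches\n")
--
--     parts.append(f"\n---\n*Total: {total} matches across {len(search_terms)} search term(s)*\n")
--     parts.append("*Tip: Use native Grep tool for better performance on literal searches.*\n")
--     return "".join(parts)
-- ===== Notes on version B (the rewrite author's own statement) =====
-- stated objective: alternative
-- what changed: B is a staged two-pass algorithm with the opposite loop nesting: pass 1 parses content once into per-file blocks of numbered lines; pass 2 iterates terms in the OUTER loop and scans the parsed blocks per term, collecting and formatting each term's per-file hits directly — instead of A's single line-outer scan that appends to flat per-term lists and then regroups each list by file in a separate pass. …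
import Mathlib
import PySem

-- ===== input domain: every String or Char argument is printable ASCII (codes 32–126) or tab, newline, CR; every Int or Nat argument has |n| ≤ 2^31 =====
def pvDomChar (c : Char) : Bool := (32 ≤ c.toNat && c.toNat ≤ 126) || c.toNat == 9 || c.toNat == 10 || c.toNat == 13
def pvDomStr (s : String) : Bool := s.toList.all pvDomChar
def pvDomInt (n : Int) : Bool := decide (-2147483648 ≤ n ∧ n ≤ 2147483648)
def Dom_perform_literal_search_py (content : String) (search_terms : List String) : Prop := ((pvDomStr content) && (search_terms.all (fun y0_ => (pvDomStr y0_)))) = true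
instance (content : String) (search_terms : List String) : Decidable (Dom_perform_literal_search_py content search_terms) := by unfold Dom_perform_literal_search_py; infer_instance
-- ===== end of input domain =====

-- B is a staged two-pass algorithm with the opposite loop nesting: it first parses the content
-- into per-file blocks of numbered lines, then searches term-by-term over the parsed blocks
-- (term-outer loop), instead of A's single line-outer scan into flat per-term lists regrouped
-- by file afterwards; objective: alternative algorithm, same asymptotic cost.

-- shared helper: content.split('\n'); the separator "\n" is a nonempty literal, so split? is always `some`
def pvSplitNL (content : String) : List String := (PySem.Str.split? content "\n").getD []

-- ===== PORT A =====
-- A's match record: (file, line_number, line.strip()[:200])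
def pvRecA (file : String) (ln : Int) (line : String) : String × Int × String :=
  (file, ln, PySem.Str.slice (PySem.Str.strip line) none (some 200))

-- one line of A's scan; state = (findings, (current_file, line_number)).
-- findings[term].append(x) is ported as `modify term [] (· ++ [x])`: the key is always present
-- (the dict is initialized with every term), so the default [] is never consulted.
def pvScanA (search_terms : List String)
    (st : PySem.Dict String (List (String × Int × String)) × String × Int) (line : String) :
    PySem.Dict String (List (String × Int × String)) × String × Int :=
  let ln := st.2.2 + 1
  if PySem.Str.startswith line "### File:" then
    (st.1, (PySem.Str.strip (PySem.Str.replace line "### File:" ""), 0))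
  else
    let ll := PySem.Str.lower line
    (search_terms.foldl
      (fun d term =>
        if PySem.Str.isIn (PySem.Str.lower term) ll then
          d.modify term [] (fun ms => ms ++ [pvRecA st.2.1 ln line])
        else d) st.1,
     (st.2.1, ln))

def pvFmtLineA (m : String × Int × String) : String :=
  "  Line " ++ PySem.Int.toStr m.2.1 ++ ": `" ++ m.2.2 ++ "`\n"

-- A's body of `for term, matches in findings.items()`; acc = (output_parts, total_matches)
def pvSectionA (acc : List String × Int) (p : String × List (String × Int × String)) :
    List String × Int :=
  let mts := p.2
  let total := acc.2 + (mts.length : Int)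
  let parts := acc.1 ++
    ["\n### \"" ++ p.1 ++ "\" (" ++ PySem.Int.toStr (mts.length : Int) ++ " matches)\n"]
  if mts.isEmpty then (parts ++ ["No matches found.\n"], total)
  else
    -- `if file not in by_file: by_file[file] = []` then `by_file[file].append(match)`
    let by_file := mts.foldl
      (fun d m => (if d.contains m.1 then d else d.insert m.1 []).modify m.1 []
                    (fun l => l ++ [m]))
      PySem.Dict.empty
    (by_file.items.foldl
      (fun ps fp =>
        let ps := ps ++ ["\n**" ++ fp.1 ++ "**\n"]
        let ps := (PySem.List.slice fp.2 none (some 10)).foldl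
          (fun ps m => ps ++ [pvFmtLineA m]) ps
        if 10 < fp.2.length then
          ps ++ ["  ... and " ++ PySem.Int.toStr ((fp.2.length : Int) - 10) ++ " more matches\n"]
        else ps)
      parts,
     total)

def perform_literal_search_py (content : String) (search_terms : List String) : String :=
  let findings0 : PySem.Dict String (List (String × Int × String)) :=
    PySem.Dict.ofList (search_terms.map (fun t => (t, [])))
  let fin := (pvSplitNL content).foldl (pvScanA search_terms) (findings0, ("unknown", 0))
  let res := fin.1.items.foldl pvSectionA (["## Literal Search Results\n"], (0 : Int))
  PySem.Str.join "" (res.1 ++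
    ["\n---\n*Total: " ++ PySem.Int.toStr res.2 ++ " matches across " ++
       PySem.Int.toStr (search_terms.length : Int) ++ " search term(s)*\n",
     "*Tip: Use native Grep tool for better performance on literal searches.*\n"])

-- ===== PORT B =====
-- pass 1: one line of the parse; state = (blocks, name, lines, n)
def pvParseStep
    (st : List (String × List (Int × String)) × String × List (Int × String) × Int)
    (line : String) :
    List (String × List (Int × String)) × String × List (Int × String) × Int :=
  if PySem.Str.startswith line "### File:" then
    (st.1 ++ [(st.2.1, st.2.2.1)],
     (PySem.Str.strip (PySem.Str.replace line "### File:" ""), [], 0))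
  else
    (st.1, (st.2.1, st.2.2.1 ++ [(st.2.2.2 + 1, line)], st.2.2.2 + 1))

def pvBlocks (content : String) : List (String × List (Int × String)) :=
  let fin := (pvSplitNL content).foldl pvParseStep ([], ("unknown", [], 0))
  fin.1 ++ [(fin.2.1, fin.2.2.1)]

-- `[(k, l.strip()[:200]) for k, l in flines if tl in l.lower()]` as filter-then-map
def pvHits (tl : String) (flines : List (Int × String)) : List (Int × String) :=
  (flines.filter (fun p => PySem.Str.isIn tl (PySem.Str.lower p.2))).map
    (fun p => (p.1, PySem.Str.slice (PySem.Str.strip p.2) none (some 200)))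

-- pass 2 per term: `by_file.setdefault(fname, []).extend(hits)` is
-- `modify fname [] (· ++ hits)` (value becomes get(fname, []) ++ hits, position kept)
def pvByFile (tl : String) (blocks : List (String × List (Int × String))) :
    PySem.Dict String (List (Int × String)) :=
  blocks.foldl
    (fun d b =>
      let hits := pvHits tl b.2
      if hits.isEmpty then d else d.modify b.1 [] (fun l => l ++ hits))
    PySem.Dict.empty

def pvFmtLineB (m : Int × String) : String :=
  "  Line " ++ PySem.Int.toStr m.1 ++ ": `" ++ m.2 ++ "`\n"

-- B's body of `for term in search_terms`; acc = (parts, total)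
def pvSectionB (blocks : List (String × List (Int × String)))
    (acc : List String × Int) (term : String) : List String × Int :=
  let by_file := pvByFile (PySem.Str.lower term) blocks
  let count := (by_file.values.map (fun v => (v.length : Int))).sum
  let total := acc.2 + count
  let parts := acc.1 ++
    ["\n### \"" ++ term ++ "\" (" ++ PySem.Int.toStr count ++ " matches)\n"]
  if by_file.items.isEmpty then (parts ++ ["No matches found.\n"], total)
  else
    (by_file.items.foldl
      (fun ps fp =>
        let ps := ps ++ ["\n**" ++ fp.1 ++ "**\n"]
        let ps := (PySem.List.slice fp.2 none (some 10)).foldl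
          (fun ps m => ps ++ [pvFmtLineB m]) ps
        if 10 < fp.2.length then
          ps ++ ["  ... and " ++ PySem.Int.toStr ((fp.2.length : Int) - 10) ++ " more matches\n"]
        else ps)
      parts,
     total)

def perform_literal_search_py_alt (content : String) (search_terms : List String) : String :=
  let blocks := pvBlocks content
  let res := search_terms.foldl (pvSectionB blocks) (["## Literal Search Results\n"], (0 : Int))
  PySem.Str.join "" (res.1 ++
    ["\n---\n*Total: " ++ PySem.Int.toStr res.2 ++ " matches across " ++
       PySem.Int.toStr (search_terms.length : Int) ++ " search term(s)*\n",
     "*Tip: Use native Grep tool for better performance on literal searches.*\n"])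

-- ===== PRECONDITION & SPEC =====
-- Pre_ excludes lists with duplicate search terms, on which A's dict comprehension collapses the
-- duplicates into one shared entry that receives one append per occurrence (a single section with
-- doubled counts) while B emits one normal section per occurrence — both duplicate-key behaviours
-- are accidental; A returns normally on every input.
def Pre_perform_literal_search_py (content : String) (search_terms : List String) : Prop :=
  search_terms.Nodup

instance (content : String) (search_terms : List String) :
    Decidable (Pre_perform_literal_search_py content search_terms) := by
  unfold Pre_perform_literal_search_py; infer_instance

def pvWitness_perform_literal_search_py : String × List String :=
  ("### File: a.py\ndef foo():\n  return BAR\n", ["bar", "baz"])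

def Spec_perform_literal_search_py (content : String) (search_terms : List String)
    (out : String) : Prop :=
  out = perform_literal_search_py_alt content search_terms

instance (content : String) (search_terms : List String) (out : String) :
    Decidable (Spec_perform_literal_search_py content search_terms out) := by
  unfold Spec_perform_literal_search_py; infer_instance

-- ===== CLAIM (what is proved, stated in full; the proofs are below) =====
def Claim_equal_perform_literal_search_py : Prop :=
  ∀ (content : String) (search_terms : List String),
    Dom_perform_literal_search_py content search_terms →
    Pre_perform_literal_search_py content search_terms →
    Spec_perform_literal_search_py content search_terms
      (perform_literal_search_py content search_terms)

-- ===== LEMMAS AND PROOFS =====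

-- ---- generic Dict facts specific to the shapes used by the two ports ----

theorem pv_contains_of_items_map {κ α β : Type} [BEq κ] (φ : α → β)
    (dA : PySem.Dict κ α) (dB : PySem.Dict κ β)
    (h : dB.items = dA.items.map (fun p => (p.1, φ p.2))) (t : κ) :
    dB.contains t = dA.contains t := by
  simp only [PySem.Dict.contains, h, List.any_map]
  rfl

theorem pv_get?_of_items_map {κ α β : Type} [BEq κ] (φ : α → β)
    (dA : PySem.Dict κ α) (dB : PySem.Dict κ β)
    (h : dB.items = dA.items.map (fun p => (p.1, φ p.2))) (t : κ) :
    dB.get? t = (dA.get? t).map φ := by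
  simp only [PySem.Dict.get?, h, List.find?_map]
  cases hf : List.find? (fun p => p.1 == t) dA.items with
  | none =>
      have : List.find? ((fun p : κ × β => p.1 == t) ∘ fun p : κ × α => (p.1, φ p.2)) dA.items
          = List.find? (fun p => p.1 == t) dA.items := rfl
      simp [this, hf]
  | some v =>
      have : List.find? ((fun p : κ × β => p.1 == t) ∘ fun p : κ × α => (p.1, φ p.2)) dA.items
          = List.find? (fun p => p.1 == t) dA.items := rfl
      simp [this, hf]

theorem pv_getD_of_items_map {κ α β : Type} [BEq κ] (φ : α → β)
    (dA : PySem.Dict κ α) (dB : PySem.Dict κ β)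
    (h : dB.items = dA.items.map (fun p => (p.1, φ p.2))) (t : κ)
    (δa : α) (δb : β) (hδ : φ δa = δb) :
    dB.getD t δb = φ (dA.getD t δa) := by
  simp only [PySem.Dict.getD, pv_get?_of_items_map φ dA dB h t]
  cases dA.get? t <;> simp [hδ]

theorem pv_modify_items_map {κ α β : Type} [BEq κ] (φ : α → β)
    (dA : PySem.Dict κ α) (dB : PySem.Dict κ β)
    (h : dB.items = dA.items.map (fun p => (p.1, φ p.2))) (t : κ)
    (δa : α) (δb : β) (hδ : φ δa = δb)
    (fa : α → α) (fb : β → β) (hf : ∀ a, φ (fa a) = fb (φ a)) :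
    (dB.modify t δb fb).items = (dA.modify t δa fa).items.map (fun p => (p.1, φ p.2)) := by
  have hc := pv_contains_of_items_map φ dA dB h t
  have hv : fb (dB.getD t δb) = φ (fa (dA.getD t δa)) := by
    rw [pv_getD_of_items_map φ dA dB h t δa δb hδ]; exact (hf _).symm
  simp only [PySem.Dict.modify, PySem.Dict.insert, hc]
  cases hca : dA.contains t with
  | false => simp [h, hv]
  | true =>
      simp only [if_true, h, List.map_map]
      apply List.map_congr_left
      intro p _
      by_cases hp : (p.1 == t) = true <;> simp [Function.comp, hp, hv]

theorem pv_foldl_modify_map {κ α β M : Type} [BEq κ] (φ : α → β) (key : M → κ)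
    (δa : α) (δb : β) (hδ : φ δa = δb)
    (fa : M → α → α) (fb : M → β → β) (hf : ∀ m a, φ (fa m a) = fb m (φ a)) :
    ∀ (ms : List M) (dA : PySem.Dict κ α) (dB : PySem.Dict κ β),
      dB.items = dA.items.map (fun p => (p.1, φ p.2)) →
      (ms.foldl (fun d m => d.modify (key m) δb (fb m)) dB).items
        = (ms.foldl (fun d m => d.modify (key m) δa (fa m)) dA).items.map
            (fun p => (p.1, φ p.2))
  | [], dA, dB, h => h
  | m :: ms, dA, dB, h => by
      simp only [List.foldl_cons]
      exact pv_foldl_modify_map φ key δa δb hδ fa fb hf ms _ _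
        (pv_modify_items_map φ dA dB h (key m) δa δb hδ (fa m) (fb m) (hf m))

-- `if file not in by_file: by_file[file] = []` followed by append is one `modify`
theorem pv_dance {κ α : Type} [BEq κ] [LawfulBEq κ]
    (d : PySem.Dict κ (List α)) (k : κ) (g : List α → List α) :
    (if d.contains k then d else d.insert k []).modify k [] g = d.modify k [] g := by
  cases hc : d.contains k with
  | true => simp
  | false =>
      simp only [Bool.false_eq_true, if_false]
      have hnone : List.find? (fun p => p.1 == k) d.items = none := by
        rw [List.find?_eq_none]
        intro p hp
        have := (List.any_eq_false.mp hc) p hp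
        simpa using this
      have hne : ∀ p ∈ d.items, ¬ (p.1 == k) = true := List.find?_eq_none.mp hnone
      apply PySem.Dict.ext
      simp only [PySem.Dict.modify, PySem.Dict.insert, PySem.Dict.getD, PySem.Dict.get?,
        PySem.Dict.contains]
      have hins : (PySem.Dict.mk (d.items ++ [(k, ([] : List α))])).items.any
          (fun p => p.1 == k) = true := by simp
      simp only [] at hins
      simp only [List.any_append, List.any_eq_false.mpr hne, Bool.false_or] at *
      simp [hnone, List.find?_append, List.map_append,
        List.map_congr_left (fun p hp => if_neg (hne p hp)),
        Bool.false_eq_true]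

-- two modifies at the same key compose
theorem pv_modify_modify {κ α : Type} [BEq κ] [LawfulBEq κ]
    (d : PySem.Dict κ α) (k : κ) (δ : α) (f g : α → α) :
    (d.modify k δ f).modify k δ g = d.modify k δ (fun a => g (f a)) := by
  show ((d.insert k (f (d.getD k δ))).insert k
      (g ((d.insert k (f (d.getD k δ))).getD k δ))) = d.insert k (g (f (d.getD k δ)))
  rw [PySem.Dict.getD_insert_self, PySem.Dict.insert_insert_self]

def pvS {κ β : Type} (l : List (κ × List β)) : Int :=
  (l.map (fun p => (p.2.length : Int))).sum

theorem pv_sum_replace {κ β : Type} [BEq κ] [LawfulBEq κ] (t : κ) (w : List β) :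
    ∀ (l : List (κ × List β)), (l.map (·.1)).Nodup →
      ∀ v, List.find? (fun p => p.1 == t) l = some v →
      pvS (l.map (fun p => if p.1 == t then (t, w) else p)) = pvS l - v.2.length + w.length
  | [], _, v, hv => by simp at hv
  | p :: l', hnd, v, hv => by
      by_cases hp : (p.1 == t) = true
      · have hpt : p.1 = t := by simpa using hp
        have hv' : v = p := by
          simp only [List.find?_cons, hp] at hv
          exact (Option.some_inj.mp hv).symm
        have hrest : ∀ q ∈ l', ¬ (q.1 == t) = true := by
          intro q hq hqt
          have : q.1 = t := by simpa using hqt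
          have : p.1 ∈ l'.map (·.1) := by
            rw [hpt, ← this]; exact List.mem_map_of_mem hq
          exact (List.nodup_cons.mp hnd).1 this
        have hid : l'.map (fun p => if p.1 == t then (t, w) else p) = l' := by
          conv_rhs => rw [← List.map_id l']
          exact List.map_congr_left fun q hq => if_neg (hrest q hq)
        subst hv'
        simp [pvS, hp, hid]
        ring
      · have hv' : List.find? (fun p => p.1 == t) l' = some v := by
          rwa [List.find?_cons_of_neg (p := fun q => q.1 == t) (a := p) (l := l') hp] at hv
        have := pv_sum_replace t w l' (List.nodup_cons.mp hnd).2 v hv'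
        simp only [pvS, List.map_cons, List.sum_cons, if_neg hp] at *
        omega

theorem pv_sum_modify {κ β : Type} [BEq κ] [LawfulBEq κ]
    (d : PySem.Dict κ (List β)) (hnd : d.keys.Nodup) (t : κ) (x : β) :
    pvS ((d.modify t [] (fun l => l ++ [x])).items) = pvS d.items + 1 := by
  cases hc : d.contains t with
  | false =>
      have hget : d.getD t [] = [] := PySem.Dict.getD_of_not_contains d [] hc
      simp only [PySem.Dict.modify, PySem.Dict.insert, hc, Bool.false_eq_true, if_false, hget]
      simp [pvS]
  | true =>
      obtain ⟨p, hp, hpt⟩ := List.any_eq_true.mp hc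
      have hsome : (List.find? (fun p => p.1 == t) d.items).isSome :=
        List.find?_isSome.mpr ⟨p, hp, hpt⟩
      obtain ⟨v, hv⟩ := Option.isSome_iff_exists.mp hsome
      have hget : d.getD t [] = v.2 := by
        simp [PySem.Dict.getD, PySem.Dict.get?, hv]
      simp only [PySem.Dict.modify, PySem.Dict.insert, hc, if_true, hget]
      have hrw := pv_sum_replace t (v.2 ++ [x]) d.items hnd v hv
      rw [hrw, List.length_append]
      simp
      ring

theorem pv_items_len_modify_ge {κ ν : Type} [BEq κ]
    (d : PySem.Dict κ ν) (t : κ) (δ : ν) (f : ν → ν) :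
    d.items.length ≤ (d.modify t δ f).items.length := by
  simp only [PySem.Dict.modify, PySem.Dict.insert]
  cases d.contains t <;> simp

-- ---- the flat per-term match list both ports are reduced to ----

def pvPi (m : String × Int × String) : Int × String := m.2

def pvRegroup (ms : List (String × Int × String)) :
    PySem.Dict String (List (Int × String)) :=
  ms.foldl (fun fd m => fd.modify m.1 [] (fun l => l ++ [pvPi m])) PySem.Dict.empty

theorem pv_count_fold :
    ∀ (ms : List (String × Int × String)) (d : PySem.Dict String (List (Int × String))),
      d.keys.Nodup →
      pvS ((ms.foldl (fun fd m => fd.modify m.1 [] (fun l => l ++ [pvPi m])) d).items)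
        = pvS d.items + ms.length
  | [], d, _ => by simp
  | m :: ms, d, hnd => by
      simp only [List.foldl_cons]
      have hnd' : (d.modify m.1 [] (fun l => l ++ [pvPi m])).keys.Nodup := by
        rw [PySem.Dict.keys_modify]
        exact PySem.Dict.nodup_keys_insert d _ _ hnd
      rw [pv_count_fold ms _ hnd', pv_sum_modify d hnd m.1 (pvPi m)]
      simp only [List.length_cons]
      push_cast
      ring

theorem pv_count (ms : List (String × Int × String)) :
    pvS ((pvRegroup ms).items) = ms.length := by
  have := pv_count_fold ms PySem.Dict.empty (by simp [PySem.Dict.keys_empty])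
  simpa [pvRegroup, pvS, PySem.Dict.empty] using this

theorem pv_foldl_items_len_ge :
    ∀ (ms : List (String × Int × String)) (d : PySem.Dict String (List (Int × String))),
      d.items.length ≤
        ((ms.foldl (fun fd m => fd.modify m.1 [] (fun l => l ++ [pvPi m])) d).items).length
  | [], d => le_refl _
  | m :: ms, d => by
      simp only [List.foldl_cons]
      exact le_trans (pv_items_len_modify_ge d m.1 [] _) (pv_foldl_items_len_ge ms _)

theorem pv_regroup_nil_iff (ms : List (String × Int × String)) :
    ((pvRegroup ms).items.isEmpty) = ms.isEmpty := by
  cases ms with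
  | nil => rfl
  | cons m ms =>
      have h1 : (1 : Nat) ≤ ((pvRegroup (m :: ms)).items).length := by
        have h0 : ((PySem.Dict.empty.modify m.1 []
            (fun l => l ++ [pvPi m]) : PySem.Dict String (List (Int × String))).items).length = 1 := by
          simp [PySem.Dict.modify, PySem.Dict.insert, PySem.Dict.contains, PySem.Dict.empty]
        have := pv_foldl_items_len_ge ms (PySem.Dict.empty.modify m.1 [] (fun l => l ++ [pvPi m]))
        simp only [pvRegroup, List.foldl_cons]
        omega
      show _ = false
      cases hitems : (pvRegroup (m :: ms)).items with
      | nil => rw [hitems] at h1; simp at h1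
      | cons a l => simp

theorem pv_ofList_items {κ ν : Type} [BEq κ] [LawfulBEq κ] (pairs : List (κ × ν))
    (hnd : (pairs.map (·.1)).Nodup) : (PySem.Dict.ofList pairs).items = pairs := by
  have := PySem.Dict.items_foldl_insert_fresh pairs (·.1) (·.2) PySem.Dict.empty
    (by intro a _; simp [PySem.Dict.contains, PySem.Dict.empty]) hnd
  simpa [PySem.Dict.ofList, PySem.Dict.update, PySem.Dict.empty] using this

-- pvFlatT tl lines cf n : the flat list of match records a single-term scan of `lines`
-- produces, starting in file cf at line counter n
def pvFlatT (tl : String) : List String → String → Int → List (String × Int × String)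
  | [], _, _ => []
  | line :: ls, cf, n =>
    if PySem.Str.startswith line "### File:" then
      pvFlatT tl ls (PySem.Str.strip (PySem.Str.replace line "### File:" "")) 0
    else
      (if PySem.Str.isIn tl (PySem.Str.lower line) then [pvRecA cf (n + 1) line] else [])
        ++ pvFlatT tl ls cf (n + 1)

-- ---- A-side: getD of the findings dict is pvFlatT ----

theorem pv_innerA_getD_out (ll : String) (rec : String × Int × String) (t : String) :
    ∀ (terms : List String) (d : PySem.Dict String (List (String × Int × String))),
      t ∉ terms →
      ((terms.foldl (fun d term =>
          if PySem.Str.isIn (PySem.Str.lower term) ll then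
            d.modify term [] (fun ms => ms ++ [rec]) else d) d)).getD t []
        = d.getD t []
  | [], d, _ => rfl
  | term :: terms, d, hnt => by
      have hne : t ≠ term := fun h => hnt (h ▸ List.mem_cons_self)
      have hnt' : t ∉ terms := fun h => hnt (List.mem_cons_of_mem _ h)
      simp only [List.foldl_cons]
      by_cases hc : PySem.Str.isIn (PySem.Str.lower term) ll = true
      · simp only [hc, if_true]
        rw [pv_innerA_getD_out ll rec t terms _ hnt', PySem.Dict.getD_modify]
        simp [hne]
      · simp only [hc]
        exact pv_innerA_getD_out ll rec t terms d hnt'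

theorem pv_innerA_getD (ll : String) (rec : String × Int × String) (t : String) :
    ∀ (terms : List String) (d : PySem.Dict String (List (String × Int × String))),
      terms.Nodup → t ∈ terms →
      ((terms.foldl (fun d term =>
          if PySem.Str.isIn (PySem.Str.lower term) ll then
            d.modify term [] (fun ms => ms ++ [rec]) else d) d)).getD t []
        = d.getD t [] ++ (if PySem.Str.isIn (PySem.Str.lower t) ll then [rec] else [])
  | [], _, _, ht => absurd ht (List.not_mem_nil)
  | term :: terms, d, hnd, ht => by
      obtain ⟨hhd, hnd'⟩ := List.nodup_cons.mp hnd
      simp only [List.foldl_cons]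
      by_cases hteq : t = term
      · subst hteq
        by_cases hc : PySem.Str.isIn (PySem.Str.lower t) ll = true
        · simp only [hc, if_true]
          rw [pv_innerA_getD_out ll rec t terms _ hhd, PySem.Dict.getD_modify_self]
        · simp only [hc]
          rw [pv_innerA_getD_out ll rec t terms _ hhd]
          simp
      · have ht' : t ∈ terms := (List.mem_cons.mp ht).resolve_left hteq
        by_cases hc : PySem.Str.isIn (PySem.Str.lower term) ll = true
        · simp only [hc, if_true]
          rw [pv_innerA_getD ll rec t terms _ hnd' ht', PySem.Dict.getD_modify]
          simp [hteq]
        · simp only [hc]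
          exact pv_innerA_getD ll rec t terms d hnd' ht'

theorem pv_scanA_flat (terms : List String) (hnd : terms.Nodup) (t : String) (ht : t ∈ terms) :
    ∀ (ls : List String) (d : PySem.Dict String (List (String × Int × String)))
      (cf : String) (n : Int),
      ((ls.foldl (pvScanA terms) (d, (cf, n))).1).getD t []
        = d.getD t [] ++ pvFlatT (PySem.Str.lower t) ls cf n
  | [], d, cf, n => by simp [pvFlatT]
  | line :: ls, d, cf, n => by
      simp only [List.foldl_cons, pvScanA, pvFlatT]
      by_cases hs : PySem.Str.startswith line "### File:" = true
      · simp only [hs, if_true]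
        exact pv_scanA_flat terms hnd t ht ls d _ 0
      · simp only [hs, Bool.false_eq_true, if_false]
        rw [pv_scanA_flat terms hnd t ht ls _ cf (n + 1),
          pv_innerA_getD (PySem.Str.lower line) (pvRecA cf (n + 1) line) t terms d hnd ht,
          List.append_assoc]

-- A's findings dict keeps exactly its initial keys through the scan
theorem pv_innerA_keys (ll : String) (rec : String × Int × String) :
    ∀ (terms : List String) (dA : PySem.Dict String (List (String × Int × String))),
      (∀ t ∈ terms, dA.contains t = true) →
      ((terms.foldl (fun d term =>
          if PySem.Str.isIn (PySem.Str.lower term) ll then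
            d.modify term [] (fun ms => ms ++ [rec]) else d) dA)).keys = dA.keys ∧
      ∀ t : String, dA.contains t = true →
        ((terms.foldl (fun d term =>
          if PySem.Str.isIn (PySem.Str.lower term) ll then
            d.modify term [] (fun ms => ms ++ [rec]) else d) dA)).contains t = true
  | [], dA, _ => ⟨rfl, fun _ h => h⟩
  | term :: terms, dA, hall => by
      simp only [List.foldl_cons]
      by_cases hc : PySem.Str.isIn (PySem.Str.lower term) ll = true
      · simp only [hc, if_true]
        have hct : dA.contains term = true := hall term (by simp)
        have hkeys : (dA.modify term [] (fun ms => ms ++ [rec])).keys = dA.keys := by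
          rw [PySem.Dict.keys_modify, PySem.Dict.keys_insert_of_contains dA _ hct]
        have hcont : ∀ t : String, dA.contains t = true →
            (dA.modify term [] (fun ms => ms ++ [rec])).contains t = true := by
          intro t ht
          rw [PySem.Dict.contains_modify]
          simp [ht]
        obtain ⟨hk, hcont'⟩ := pv_innerA_keys ll rec terms _
          (fun t ht => hcont t (hall t (by simp [ht])))
        exact ⟨hk.trans hkeys, fun t ht => hcont' t (hcont t ht)⟩
      · simp only [hc]
        exact pv_innerA_keys ll rec terms dA (fun t ht => hall t (by simp [ht]))

theorem pv_scanA_step (terms : List String) (line : String)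
    (st : PySem.Dict String (List (String × Int × String)) × String × Int)
    (hall : ∀ t ∈ terms, st.1.contains t = true) :
    (pvScanA terms st line).1.keys = st.1.keys ∧
      ∀ t ∈ terms, (pvScanA terms st line).1.contains t = true := by
  obtain ⟨dA, cf, ln⟩ := st
  simp only [pvScanA]
  by_cases hs : PySem.Str.startswith line "### File:" = true
  · simp only [hs, if_true]
    exact ⟨by simp, hall⟩
  · simp only [hs]
    obtain ⟨hk, hcont⟩ := pv_innerA_keys (PySem.Str.lower line)
      (pvRecA cf (ln + 1) line) terms dA hall
    exact ⟨hk, fun t ht => hcont t (hall t ht)⟩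

theorem pv_scanA_keys (terms : List String) :
    ∀ (lines : List String)
      (st : PySem.Dict String (List (String × Int × String)) × String × Int),
      (∀ t ∈ terms, st.1.contains t = true) →
      (lines.foldl (pvScanA terms) st).1.keys = st.1.keys ∧
        ∀ t ∈ terms, (lines.foldl (pvScanA terms) st).1.contains t = true
  | [], st, hall => ⟨rfl, hall⟩
  | line :: lines, st, hall => by
      simp only [List.foldl_cons]
      obtain ⟨hk1, hc1⟩ := pv_scanA_step terms line st hall
      obtain ⟨hk', hc'⟩ := pv_scanA_keys terms lines (pvScanA terms st line) hc1
      exact ⟨hk'.trans hk1, hc'⟩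

-- ---- B-side: blocks flatten back to pvFlatT, and pvByFile is pvRegroup of it ----

def pvFlatB (tl : String) (blocks : List (String × List (Int × String))) :
    List (String × Int × String) :=
  blocks.flatMap (fun b => (pvHits tl b.2).map (fun h => (b.1, h)))

theorem pv_hits_append (tl : String) (lns : List (Int × String)) (x : Int × String) :
    pvHits tl (lns ++ [x])
      = pvHits tl lns ++
        (if PySem.Str.isIn tl (PySem.Str.lower x.2) then
          [(x.1, PySem.Str.slice (PySem.Str.strip x.2) none (some 200))] else []) := by
  simp only [pvHits, List.filter_append, List.map_append, List.filter_cons, List.filter_nil]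
  cases hc : PySem.Str.isIn tl (PySem.Str.lower x.2) <;>
    simp only [Bool.false_eq_true, if_false, if_true, List.map_cons, List.map_nil]

theorem pv_parse_flat (tl : String) :
    ∀ (ls : List String)
      (st : List (String × List (Int × String)) × String × List (Int × String) × Int),
      pvFlatB tl ((ls.foldl pvParseStep st).1 ++
          [((ls.foldl pvParseStep st).2.1, (ls.foldl pvParseStep st).2.2.1)])
        = pvFlatB tl (st.1 ++ [(st.2.1, st.2.2.1)]) ++ pvFlatT tl ls st.2.1 st.2.2.2
  | [], st => by simp [pvFlatT]
  | line :: ls, st => by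
      simp only [List.foldl_cons, pvFlatT]
      by_cases hs : PySem.Str.startswith line "### File:" = true
      · simp only [pvParseStep, hs, if_true]
        rw [pv_parse_flat tl ls _]
        simp [pvFlatB, pvHits]
      · simp only [pvParseStep, hs, if_false, Bool.false_eq_true]
        rw [pv_parse_flat tl ls _]
        simp only [pvFlatB, List.flatMap_append, List.flatMap_cons, List.flatMap_nil,
          List.append_nil]
        rw [pv_hits_append tl st.2.2.1 (st.2.2.2 + 1, line), List.map_append]
        cases hc : PySem.Str.isIn tl (PySem.Str.lower line) <;>
          simp only [Bool.false_eq_true, if_false, if_true, List.map_cons, List.map_nil,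
            List.append_nil, List.nil_append, List.append_assoc, pvRecA]

theorem pv_extend_fold {κ : Type} [BEq κ] [LawfulBEq κ] (k : κ) :
    ∀ (hits : List (Int × String)) (d : PySem.Dict κ (List (Int × String))),
      hits ≠ [] →
      d.modify k [] (fun l => l ++ hits)
        = hits.foldl (fun d h => d.modify k [] (fun l => l ++ [h])) d
  | [], _, hne => absurd rfl hne
  | h :: hits, d, _ => by
      cases hits with
      | nil => simp
      | cons h2 hits2 =>
          rw [List.foldl_cons, ← pv_extend_fold k (h2 :: hits2) _ (by simp),
            pv_modify_modify]
          simp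

theorem pv_byfile_fold (tl : String) :
    ∀ (blocks : List (String × List (Int × String)))
      (d : PySem.Dict String (List (Int × String))),
      blocks.foldl
        (fun d b =>
          let hits := pvHits tl b.2
          if hits.isEmpty then d else d.modify b.1 [] (fun l => l ++ hits)) d
        = (pvFlatB tl blocks).foldl
            (fun fd m => fd.modify m.1 [] (fun l => l ++ [pvPi m])) d
  | [], d => rfl
  | b :: blocks, d => by
      simp only [List.foldl_cons, pvFlatB, List.flatMap_cons, List.foldl_append]
      rw [pv_byfile_fold tl blocks]
      congr 1
      rw [List.foldl_map]
      cases hh : pvHits tl b.2 with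
      | nil => simp
      | cons h hs =>
          simp only [List.isEmpty_cons, Bool.false_eq_true, if_false]
          exact pv_extend_fold b.1 (h :: hs) d (by simp)

theorem pv_byfile_regroup (tl : String) (blocks : List (String × List (Int × String))) :
    pvByFile tl blocks = pvRegroup (pvFlatB tl blocks) := by
  unfold pvByFile pvRegroup
  exact pv_byfile_fold tl blocks PySem.Dict.empty

-- ---- the two section formatters agree on a common flat match list ----

theorem pv_section_eq (blocks : List (String × List (Int × String)))
    (t : String) (ms : List (String × Int × String))
    (hB : pvByFile (PySem.Str.lower t) blocks = pvRegroup ms) (acc : List String × Int) :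
    pvSectionB blocks acc t = pvSectionA acc (t, ms) := by
  simp only [pvSectionA, pvSectionB, hB]
  have hcount : ((pvRegroup ms).values.map (fun v => (v.length : Int))).sum
      = ((ms.length : Nat) : Int) := by
    rw [← pv_count ms]
    simp [PySem.Dict.values, pvS, List.map_map]
    rfl
  rw [hcount, pv_regroup_nil_iff]
  by_cases hms : ms.isEmpty = true
  · simp only [hms, if_true]
  · simp only [hms]
    have hdance : (fun (d : PySem.Dict String (List (String × Int × String))) m =>
        (if d.contains m.1 then d else d.insert m.1 []).modify m.1 [] (fun l => l ++ [m]))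
        = fun d m => d.modify m.1 [] (fun l => l ++ [m]) := by
      funext d m
      exact pv_dance d m.1 _
    rw [hdance]
    have hitems : (pvRegroup ms).items =
        ((ms.foldl (fun d m => d.modify m.1 [] (fun l => l ++ [m]))
          PySem.Dict.empty).items).map (fun p => (p.1, p.2.map pvPi)) := by
      exact pv_foldl_modify_map (List.map pvPi) (·.1) [] [] rfl
        (fun m l => l ++ [m]) (fun m l => l ++ [pvPi m]) (by intro m a; simp)
        ms PySem.Dict.empty PySem.Dict.empty rfl
    rw [hitems, List.foldl_map]
    refine congrArg₂ Prod.mk ?_ rfl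
    apply PySem.List.foldl_congr_mem
    intro ps fp _
    have hslice : PySem.List.slice (fp.2.map pvPi) none (some 10)
        = (PySem.List.slice fp.2 none (some 10)).map pvPi := by
      rw [PySem.List.slice_to _ (by norm_num), PySem.List.slice_to _ (by norm_num),
        List.map_take]
    simp only [hslice, List.foldl_map, List.length_map]
    rfl

-- ===== VERDICT (by name: the statement is the Claim_ definition above) =====
theorem perform_literal_search_py_spec : Claim_equal_perform_literal_search_py := by
  unfold Claim_equal_perform_literal_search_py
  intro content terms _ hpre
  unfold Pre_perform_literal_search_py at hpre
  unfold Spec_perform_literal_search_py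
  simp only [perform_literal_search_py, perform_literal_search_py_alt]
  have hA0 : (PySem.Dict.ofList
      (terms.map (fun t => (t, ([] : List (String × Int × String)))))).items
      = terms.map (fun t => (t, [])) :=
    pv_ofList_items _ (by simpa [List.map_map, Function.comp_def] using hpre)
  have hcont0 : ∀ t ∈ terms,
      (PySem.Dict.ofList
        (terms.map (fun t => (t, ([] : List (String × Int × String)))))).contains t = true := by
    intro t ht
    simp only [PySem.Dict.contains, hA0, List.any_eq_true]
    exact ⟨(t, []), List.mem_map_of_mem ht, by simp⟩
  obtain ⟨hkeys, -⟩ := pv_scanA_keys terms (pvSplitNL content)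
    (PySem.Dict.ofList (terms.map (fun t => (t, []))), ("unknown", 0)) hcont0
  have hkeys0 : (PySem.Dict.ofList
      (terms.map (fun t => (t, ([] : List (String × Int × String)))))).keys = terms := by
    rw [show (PySem.Dict.ofList
      (terms.map (fun t => (t, ([] : List (String × Int × String)))))).keys
      = (PySem.Dict.ofList
        (terms.map (fun t => (t, ([] : List (String × Int × String)))))).items.map (·.1)
      from rfl, hA0]
    simp [List.map_map, Function.comp_def]
  have hnodup : ((pvSplitNL content).foldl (pvScanA terms)
      (PySem.Dict.ofList (terms.map (fun t => (t, []))), ("unknown", 0))).1.keys.Nodup := by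
    rw [hkeys, hkeys0]; exact hpre
  have hitems : ((pvSplitNL content).foldl (pvScanA terms)
      (PySem.Dict.ofList (terms.map (fun t => (t, []))), ("unknown", 0))).1.items
      = terms.map (fun t => (t, ((pvSplitNL content).foldl (pvScanA terms)
          (PySem.Dict.ofList (terms.map (fun t => (t, []))), ("unknown", 0))).1.getD t [])) := by
    rw [PySem.Dict.items_eq_map_keys _ hnodup [], hkeys, hkeys0]
  rw [hitems, List.foldl_map]
  rw [PySem.List.foldl_congr_mem terms _ (pvSectionB (pvBlocks content)) _ ?_]
  intro acc t ht
  -- B's nested by_file for t equals the regrouping of A's flat list for t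
  have hgetD0 : (PySem.Dict.ofList
      (terms.map (fun t => (t, ([] : List (String × Int × String)))))).getD t [] = [] := by
    apply PySem.Dict.getD_of_mem_items (v := []) _ _
    · rw [hkeys0]; exact hpre
    · rw [hA0]; exact List.mem_map_of_mem ht
  have hflatA : ((pvSplitNL content).foldl (pvScanA terms)
      (PySem.Dict.ofList (terms.map (fun t => (t, []))), ("unknown", 0))).1.getD t []
      = pvFlatT (PySem.Str.lower t) (pvSplitNL content) "unknown" 0 := by
    rw [pv_scanA_flat terms hpre t ht (pvSplitNL content) _ "unknown" 0, hgetD0,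
      List.nil_append]
  have hflatB : pvFlatB (PySem.Str.lower t) (pvBlocks content)
      = pvFlatT (PySem.Str.lower t) (pvSplitNL content) "unknown" 0 := by
    have := pv_parse_flat (PySem.Str.lower t) (pvSplitNL content) ([], ("unknown", [], 0))
    simpa [pvBlocks, pvFlatB, pvHits] using this
  exact pv_section_eq (pvBlocks content) t
    (((pvSplitNL content).foldl (pvScanA terms)
      (PySem.Dict.ofList (terms.map (fun t => (t, []))), ("unknown", 0))).1.getD t [])
    (by rw [pv_byfile_regroup, hflatB, hflatA]) acc |>.symm
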